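-- pv_equiv track=rewrite | github.com/Raahim-Lone/gemma | rewrite_pipeline.py | groups_to_composite
-- ===== SOURCE A (Python) =====
-- from typing import Any, Dict, List, Optional, Tuple, Union
--
-- def groups_to_composite(groups: List[List[str]]):
--     """
--     Convert list-of-steps (each a list of primitives; len>1 = parallel) into:
--       nodes: flat list of primitives in execution order
--       parallel: {gid: [node_indices]}  (gid starts at 0)
--       depth, num_nodes, num_parallel: small graph summary
--     """
--     nodes: List[str] = []
--     parallel: Dict[int, List[int]] = {}
--     gid = 0
--     for step in groups:
--         if len(step) == 1:
--             nodes.append(step[0])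
--         else:
--             start = len(nodes)
--             for prim in step:
--                 nodes.append(prim)
--             parallel[gid] = list(range(start, start + len(step)))
--             gid += 1
--     depth = 2 if parallel else 1
--     num_nodes = len(nodes)
--     num_parallel = len(parallel)
--     return nodes, parallel, depth, num_nodes, num_parallel
-- ===== SOURCE B (Python) =====
-- def groups_to_composite(groups):
--     # Inverse-index algorithm: tag every primitive with its group id, flatten,
--     # then recover each parallel group's node indices by GROUPING the enumerated
--     # flat list by group id (no running offset / range arithmetic).
--     tagged = [(gi, prim) for gi, step in enumerate(groups) for prim in step]
--     nodes = [prim for _, prim in tagged]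
--     pairs = [(gi, idx) for idx, (gi, _) in enumerate(tagged)]
--     members = {}
--     for gi, idx in pairs:
--         members.setdefault(gi, []).append(idx)
--     parallel = {}
--     for gi, step in enumerate(groups):
--         if len(step) != 1:
--             parallel[len(parallel)] = members.get(gi, [])
--     depth = 2 if parallel else 1
--     return nodes, parallel, depth, len(nodes), len(parallel)
-- ===== Notes on version B (the rewrite author's own statement) =====
-- stated objective: alternative
-- what changed: A computes parallel index ranges arithmetically in one interleaved loop with a gid counter and len(nodes); B instead tags every primitive with its group id, flattens, and recovers each group's node indices by grouping the enumerated flat list by group id in a dict (an inverse index), keying parallel by the dict's current size.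
import Mathlib
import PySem

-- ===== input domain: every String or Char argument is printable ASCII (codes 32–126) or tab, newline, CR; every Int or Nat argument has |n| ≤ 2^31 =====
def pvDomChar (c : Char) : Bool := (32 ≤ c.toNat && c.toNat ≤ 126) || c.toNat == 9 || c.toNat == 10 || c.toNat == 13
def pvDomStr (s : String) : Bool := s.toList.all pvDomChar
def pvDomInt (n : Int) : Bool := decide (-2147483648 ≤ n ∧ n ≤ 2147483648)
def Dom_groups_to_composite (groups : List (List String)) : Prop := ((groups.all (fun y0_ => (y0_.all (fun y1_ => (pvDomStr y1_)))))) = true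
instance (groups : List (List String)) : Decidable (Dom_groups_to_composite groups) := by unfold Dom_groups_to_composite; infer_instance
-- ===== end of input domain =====

-- B replaces A's interleaved loop (offset/range arithmetic with a gid counter) by an
-- inverse index: tag each primitive with its group id, flatten, group the enumerated
-- flat list by group id in a dict, and read each parallel group's indices back from it.
-- Objective: alternative (same asymptotic cost).

-- ===== PORT A =====
-- loop body of A: state is (nodes, parallel, gid); step[0] on a list of length 1 is its head (exact here, the branch guard holds)
def gtcStepA (st : List String × PySem.Dict Int (List Int) × Int) (step : List String) :
    List String × PySem.Dict Int (List Int) × Int :=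
  let (nodes, parallel, gid) := st
  if step.length = 1 then
    (nodes ++ [step.headI], parallel, gid)
  else
    let start : Int := nodes.length
    let nodes' := step.foldl (fun acc prim => acc ++ [prim]) nodes
    (nodes', parallel.insert gid (PySem.List.pyRange start (start + step.length) 1), gid + 1)

def groups_to_composite (groups : List (List String)) : List String × (List (Int × List Int)) × Int × Int × Int :=
  let st := groups.foldl gtcStepA ([], PySem.Dict.empty, 0)
  let nodes := st.1
  let parallel := st.2.1
  let depth : Int := if parallel.items.isEmpty then 1 else 2
  (nodes, parallel.items, depth, (nodes.length : Int), (parallel.size : Int))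

-- ===== PORT B =====
def groups_to_composite_alt (groups : List (List String)) : List String × (List (Int × List Int)) × Int × Int × Int :=
  let tagged := (PySem.List.enumerate groups 0).flatMap (fun q => q.2.map (fun prim => (q.1, prim)))
  let nodes := tagged.map (fun q => q.2)
  let pairs := (PySem.List.enumerate tagged 0).map (fun q => (q.2.1, q.1))
  let members := pairs.foldl (fun d p => d.modify p.1 [] (· ++ [p.2])) PySem.Dict.empty
  let parallel := (PySem.List.enumerate groups 0).foldl
      (fun d q => if q.2.length ≠ 1 then d.insert (d.size : Int) (members.getD q.1 []) else d)
      PySem.Dict.empty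
  let depth : Int := if parallel.items.isEmpty then 1 else 2
  (nodes, parallel.items, depth, (nodes.length : Int), (parallel.size : Int))

-- ===== PRECONDITION & SPEC =====
def Spec_groups_to_composite (groups : List (List String)) (out : List String × (List (Int × List Int)) × Int × Int × Int) : Prop := out = groups_to_composite_alt groups
instance (groups : List (List String)) (out : List String × (List (Int × List Int)) × Int × Int × Int) : Decidable (Spec_groups_to_composite groups out) := by unfold Spec_groups_to_composite; infer_instance

-- ===== CLAIM (what is proved, stated in full; the proofs are below) =====
def Claim_equal_groups_to_composite : Prop := ∀ (groups : List (List String)), Dom_groups_to_composite groups → Spec_groups_to_composite groups (groups_to_composite groups)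

-- ===== LEMMAS AND PROOFS =====

theorem singleton_of_length_one {α : Type} {l : List α} [Inhabited α] (h : l.length = 1) :
    l = [l.headI] := by
  cases l with
  | nil => simp at h
  | cons x t => cases t with
    | nil => rfl
    | cons y t' => simp at h

-- common specification of the parallel map's items: (gid, [off, …, off+len-1]) per non-singleton group
def gtcSpec : List (List String) → Int → Int → List (Int × List Int)
  | [], _, _ => []
  | g :: gs, off, gid =>
    if g.length = 1 then gtcSpec gs (off + 1) gid
    else (gid, PySem.List.pyRange off (off + g.length) 1) :: gtcSpec gs (off + g.length) (gid + 1)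

-- B's (gi, node_index) pair list, parametrised by the enumeration starts
def gtcPairs (gs : List (List String)) (s o : Int) : List (Int × Int) :=
  (PySem.List.enumerate ((PySem.List.enumerate gs s).flatMap (fun q => q.2.map (fun prim => (q.1, prim)))) o).map
    (fun q => (q.2.1, q.1))

theorem gtcPairs_cons (g : List String) (gs : List (List String)) (s o : Int) :
    gtcPairs (g :: gs) s o =
      (PySem.List.enumerate (g.map (fun prim => (s, prim))) o).map (fun q => (q.2.1, q.1)) ++
        gtcPairs gs (s + 1) (o + g.length) := by
  simp [gtcPairs, PySem.List.enumerate_cons, PySem.List.enumerate_append]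

theorem gtcPairs_fst_eq (gs : List (List String)) :
    ∀ (s o : Int) (p : Int × Int), p ∈ gtcPairs gs s o → s ≤ p.1 := by
  induction gs with
  | nil => intro s o p hp; simp [gtcPairs, PySem.List.enumerate_nil] at hp
  | cons g gs ih =>
    intro s o p hp
    rw [gtcPairs_cons] at hp
    rcases List.mem_append.mp hp with h | h
    · rcases List.mem_map.mp h with ⟨q, hq, rfl⟩
      rcases (PySem.List.mem_enumerate_iff _ _ _).mp hq with ⟨k, hk, rfl⟩
      simp
    · have := ih (s + 1) (o + g.length) p h
      omega

theorem gtcPairs_filter_lt (gs : List (List String)) :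
    ∀ (s o t : Int), t < s → (gtcPairs gs s o).filter (fun p => p.1 == t) = [] := by
  intro s o t ht
  rw [List.filter_eq_nil_iff]
  intro p hp
  have := gtcPairs_fst_eq gs s o p hp
  simp only [beq_iff_eq]
  omega

theorem gtcPairs_filter_head (g : List String) (gs : List (List String)) (s o : Int) :
    ((gtcPairs (g :: gs) s o).filter (fun p => p.1 == s)).map (fun p => p.2) =
      PySem.List.pyRange o (o + g.length) 1 := by
  rw [gtcPairs_cons, List.filter_append, gtcPairs_filter_lt gs (s + 1) (o + g.length) s (by omega),
    List.append_nil]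
  have h1 : ((PySem.List.enumerate (g.map (fun prim => (s, prim))) o).map (fun q => (q.2.1, q.1))).filter
      (fun p => p.1 == s) = (PySem.List.enumerate (g.map (fun prim => (s, prim))) o).map (fun q => (q.2.1, q.1)) := by
    rw [List.filter_eq_self]
    intro p hp
    rcases List.mem_map.mp hp with ⟨q, hq, rfl⟩
    rcases (PySem.List.mem_enumerate_iff _ _ _).mp hq with ⟨k, hk, rfl⟩
    simp at hk
    simp [List.getElem_map]
  rw [h1, List.map_map]
  have h2 : ((fun p : Int × Int => p.2) ∘ fun q : Int × (Int × String) => (q.2.1, q.1)) =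
      fun q : Int × (Int × String) => q.1 := rfl
  rw [h2]
  have h3 := PySem.List.map_fst_enumerate (g.map (fun prim => (s, prim))) o
  simpa using h3

theorem gtcPairs_filter_tail (g : List String) (gs : List (List String)) (s o t : Int) (ht : t ≠ s) :
    (gtcPairs (g :: gs) s o).filter (fun p => p.1 == t) =
      (gtcPairs gs (s + 1) (o + g.length)).filter (fun p => p.1 == t) := by
  rw [gtcPairs_cons, List.filter_append]
  have h1 : ((PySem.List.enumerate (g.map (fun prim => (s, prim))) o).map (fun q => (q.2.1, q.1))).filter
      (fun p => p.1 == t) = [] := by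
    rw [List.filter_eq_nil_iff]
    intro p hp
    rcases List.mem_map.mp hp with ⟨q, hq, rfl⟩
    rcases (PySem.List.mem_enumerate_iff _ _ _).mp hq with ⟨k, hk, rfl⟩
    simp at hk
    simp [List.getElem_map]
    omega
  rw [h1, List.nil_append]

-- A's fold: nodes accumulate the flatten; the parallel dict's items follow gtcSpec
theorem gtc_foldA (gs : List (List String)) :
    ∀ (ns : List String) (par : PySem.Dict Int (List Int)) (gid : Int),
      (∀ k ∈ par.keys, k < gid) →
      (gs.foldl gtcStepA (ns, par, gid)).1 = ns ++ gs.flatten ∧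
      (gs.foldl gtcStepA (ns, par, gid)).2.1.items = par.items ++ gtcSpec gs (ns.length : Int) gid := by
  induction gs with
  | nil => intro ns par gid _; simp [gtcSpec]
  | cons g gs ih =>
    intro ns par gid hk
    simp only [List.foldl_cons, gtcStepA]
    by_cases h : g.length = 1
    · rw [if_pos h]
      have hg : g = [g.headI] := singleton_of_length_one h
      rcases ih (ns ++ [g.headI]) par gid hk with ⟨h1, h2⟩
      refine ⟨?_, ?_⟩
      · rw [h1]; simp; exact hg.symm ▸ rfl
      · rw [h2]
        have hlen : (((ns ++ [g.headI]).length : Nat) : Int) = (ns.length : Int) + 1 := by simp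
        rw [hlen]
        simp [gtcSpec, h]
    · rw [if_neg h, PySem.List.foldl_append_singleton_eq_self]
      have hnc : par.contains gid = false := by
        by_contra hc
        have : gid ∈ par.keys := (PySem.Dict.contains_iff_mem_keys par gid).mp (by
          cases hb : par.contains gid
          · exact absurd hb hc
          · rfl)
        exact absurd (hk gid this) (by omega)
      have hk' : ∀ k ∈ (par.insert gid (PySem.List.pyRange (ns.length : Int)
          ((ns.length : Int) + (g.length : Int)) 1)).keys, k < gid + 1 := by
        intro k hkm
        rcases (PySem.Dict.mem_keys_insert _ _ _ _).mp hkm with rfl | hkm'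
        · omega
        · have := hk k hkm'; omega
      rcases ih (ns ++ g) _ (gid + 1) hk' with ⟨h1, h2⟩
      refine ⟨by rw [h1]; simp, ?_⟩
      rw [h2, PySem.Dict.items_insert_of_not_contains par _ hnc]
      have hlen : (((ns ++ g).length : Nat) : Int) = (ns.length : Int) + (g.length : Int) := by simp
      rw [hlen]
      simp [gtcSpec, h]

-- B's parallel fold equals gtcSpec, for any member function matching the filtered pairs
theorem gtc_foldB (m : Int → List Int) (gs : List (List String)) :
    ∀ (s o : Int) (d : PySem.Dict Int (List Int)),
      (∀ k ∈ d.keys, k < (d.size : Int)) →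
      (∀ t, s ≤ t → m t = ((gtcPairs gs s o).filter (fun p => p.1 == t)).map (fun p => p.2)) →
      ((PySem.List.enumerate gs s).foldl
          (fun d q => if q.2.length ≠ 1 then d.insert (d.size : Int) (m q.1) else d) d).items
        = d.items ++ gtcSpec gs o (d.size : Int) := by
  induction gs with
  | nil => intro s o d _ _; simp [PySem.List.enumerate_nil, gtcSpec]
  | cons g gs ih =>
    intro s o d hk hm
    rw [PySem.List.enumerate_cons]
    simp only [List.foldl_cons]
    by_cases h : g.length = 1
    · rw [if_neg (by simpa using h)]
      have hm' : ∀ t, s + 1 ≤ t → m t =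
          ((gtcPairs gs (s + 1) (o + g.length)).filter (fun p => p.1 == t)).map (fun p => p.2) := by
        intro t ht
        rw [hm t (by omega), gtcPairs_filter_tail g gs s o t (by omega)]
      rw [ih (s + 1) (o + g.length) d hk hm']
      simp [gtcSpec, h]
    · rw [if_pos (by simpa using h)]
      have hnc : d.contains ((d.size : Nat) : Int) = false := by
        by_contra hc
        have : ((d.size : Nat) : Int) ∈ d.keys := (PySem.Dict.contains_iff_mem_keys d _).mp (by
          cases hb : d.contains ((d.size : Nat) : Int)
          · exact absurd hb hc
          · rfl)
        exact absurd (hk _ this) (by omega)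
      have hms : m s = PySem.List.pyRange o (o + g.length) 1 := by
        rw [hm s le_rfl, gtcPairs_filter_head]
      have hsize : (d.insert ((d.size : Nat) : Int) (m s)).size = d.size + 1 := by
        rw [PySem.Dict.size_insert]; simp [hnc]
      have hk' : ∀ k ∈ (d.insert ((d.size : Nat) : Int) (m s)).keys,
          k < (((d.insert ((d.size : Nat) : Int) (m s)).size : Nat) : Int) := by
        intro k hkm
        rcases (PySem.Dict.mem_keys_insert _ _ _ _).mp hkm with rfl | hkm'
        · rw [hsize]; push_cast; omega
        · have := hk k hkm'; rw [hsize]; push_cast; push_cast at this; omega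
      have hm' : ∀ t, s + 1 ≤ t → m t =
          ((gtcPairs gs (s + 1) (o + g.length)).filter (fun p => p.1 == t)).map (fun p => p.2) := by
        intro t ht
        rw [hm t (by omega), gtcPairs_filter_tail g gs s o t (by omega)]
      rw [ih (s + 1) (o + g.length) _ hk' hm']
      rw [PySem.Dict.items_insert_of_not_contains d _ hnc, hsize, hms]
      simp [gtcSpec, h]

theorem gtc_nodesB (gs : List (List String)) :
    ∀ (s : Int), ((PySem.List.enumerate gs s).flatMap (fun q => q.2.map (fun prim => (q.1, prim)))).map
        (fun q => q.2) = gs.flatten := by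
  induction gs with
  | nil => intro s; simp [PySem.List.enumerate_nil]
  | cons g gs ih => intro s; simp [PySem.List.enumerate_cons, ih (s + 1), List.map_map]

-- ===== VERDICT (by name: the statement is the Claim_ definition above) =====
theorem groups_to_composite_spec : Claim_equal_groups_to_composite := by
  intro groups _
  unfold Spec_groups_to_composite groups_to_composite groups_to_composite_alt
  obtain ⟨hA1, hA2⟩ := gtc_foldA groups [] PySem.Dict.empty 0 (by simp)
  simp only [List.length_nil, Int.natCast_zero, List.nil_append] at hA1 hA2
  have hemp : (PySem.Dict.empty : PySem.Dict Int (List Int)).items = [] := rfl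
  rw [hemp, List.nil_append] at hA2
  have hB := gtc_foldB
      (fun t => (((PySem.List.enumerate ((PySem.List.enumerate groups 0).flatMap
          (fun q => q.2.map (fun prim => (q.1, prim)))) 0).map (fun q => (q.2.1, q.1))).foldl
          (fun d p => d.modify p.1 [] (· ++ [p.2])) PySem.Dict.empty).getD t [])
      groups 0 0 PySem.Dict.empty (by simp)
      (by
        intro t _
        dsimp only
        rw [PySem.Dict.getD_foldl_modify_append]
        rw [PySem.Dict.getD_empty, List.nil_append]
        rfl)
  simp only [] at hB
  rw [hemp, List.nil_append] at hB
  rw [PySem.Dict.size_empty] at hB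
  simp only [Int.natCast_zero] at hB
  dsimp only
  have hAB := hA2.trans hB.symm
  have hN := hA1.trans (gtc_nodesB groups 0).symm
  refine Prod.ext hN (Prod.ext hAB (Prod.ext (by rw [hAB]) (Prod.ext
    (congrArg (fun l : List String => ((l.length : Nat) : Int)) hN)
    (congrArg (fun l : List (Int × List Int) => ((l.length : Nat) : Int)) hAB))))
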